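-- pv_equiv track=rewrite | github.com/D-393Patel/real-time-competitor-intelligence | src/competitor_tracker/generate_benchmark_data.py | render_raw_html
-- ===== SOURCE A (Python) =====
-- def render_raw_html(market_key: str, listings: list[dict]) -> str:
--     if market_key == "amazon_books":
--         items = "\n".join(
--             f"""  <div class="book-card" data-listing-id="{listing['listing_id']}">
--     <span class="title">{listing['title']}</span>
--     <span class="author">{listing['author']}</span>
--     <span class="isbn">{listing['isbn']}</span>
--     <span class="edition">{listing['edition']}</span>
--     <span class="publisher">{listing['publisher']}</span>
--     <span class="format">{listing['format']}</span>
--     <span class="price">{listing['price']}</span>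
--     <span class="shipping">{listing['shipping']}</span>
--     <span class="rating">{listing['seller_rating']}</span>
--     <span class="availability">{listing['availability']}</span>
--   </div>"""
--             for listing in listings
--         )
--     elif market_key == "flipkart_books":
--         items = "\n".join(
--             f"""  <section class="listing" data-listing-id="{listing['listing_id']}">
--     <div class="listing-title">{listing['title']}</div>
--     <div class="listing-author">{listing['author']}</div>
--     <div class="listing-isbn">{listing['isbn']}</div>
--     <div class="listing-edition">{listing['edition']}</div>
--     <div class="listing-publisher">{listing['publisher']}</div>
--     <div class="listing-format">{listing['format']}</div>
--     <div class="listing-price">{listing['price']}</div>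
--     <div class="listing-shipping">{listing['shipping']}</div>
--     <div class="listing-rating">{listing['seller_rating']}</div>
--     <div class="listing-availability">{listing['availability']}</div>
--   </section>"""
--             for listing in listings
--         )
--     else:
--         items = "\n".join(
--             f"""  <article class="book-row" data-id="{listing['listing_id']}">
--     <p class="book-title">{listing['title']}</p>
--     <p class="book-author">{listing['author']}</p>
--     <p class="book-isbn">{listing['isbn']}</p>
--     <p class="book-edition">{listing['edition']}</p>
--     <p class="book-publisher">{listing['publisher']}</p>
--     <p class="book-format">{listing['format']}</p>
--     <p class="book-price">{listing['price']}</p>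
--     <p class="book-shipping">{listing['shipping']}</p>
--     <p class="book-rating">{listing['seller_rating']}</p>
--     <p class="book-availability">{listing['availability']}</p>
--   </article>"""
--             for listing in listings
--         )
--     return f"<!DOCTYPE html>\n<html lang=\"en\">\n<body>\n{items}\n</body>\n</html>\n"
-- ===== SOURCE B (Python) =====
-- _FIELDS = [
--     ("title", "title"), ("author", "author"), ("isbn", "isbn"),
--     ("edition", "edition"), ("publisher", "publisher"), ("format", "format"),
--     ("price", "price"), ("shipping", "shipping"), ("rating", "seller_rating"),
--     ("availability", "availability"),
-- ]
--
-- _MARKETS = {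
--     "amazon_books": ("div", "book-card", "data-listing-id", "span", ""),
--     "flipkart_books": ("section", "listing", "data-listing-id", "div", "listing-"),
-- }
-- _DEFAULT = ("article", "book-row", "data-id", "p", "book-")
--
--
-- def render_raw_html(market_key: str, listings: list[dict]) -> str:
--     wrap_tag, wrap_cls, id_attr, field_tag, prefix = _MARKETS.get(market_key, _DEFAULT)
--     blocks = []
--     for listing in listings:
--         lines = [f'  <{wrap_tag} class="{wrap_cls}" {id_attr}="{listing["listing_id"]}">']
--         for suffix, key in _FIELDS:
--             lines.append(f'    <{field_tag} class="{prefix}{suffix}">{listing[key]}</{field_tag}>')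
--         lines.append(f'  </{wrap_tag}>')
--         blocks.append("\n".join(lines))
--     items = "\n".join(blocks)
--     return f'<!DOCTYPE html>\n<html lang="en">\n<body>\n{items}\n</body>\n</html>\n'
-- ===== Notes on version B (the rewrite author's own statement) =====
-- stated objective: simpler
-- what changed: Replaces A's three copy-pasted per-market f-string templates with one table-driven renderer: a market-config lookup (wrapper tag/class, id attribute, field tag, class prefix) plus a single shared (class_suffix, dict_key) field list looped over per listing.
-- outside the precondition, e.g. on render_raw_html('amazon_books', [{}]): A raises KeyError, B raises KeyError
import Mathlib
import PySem

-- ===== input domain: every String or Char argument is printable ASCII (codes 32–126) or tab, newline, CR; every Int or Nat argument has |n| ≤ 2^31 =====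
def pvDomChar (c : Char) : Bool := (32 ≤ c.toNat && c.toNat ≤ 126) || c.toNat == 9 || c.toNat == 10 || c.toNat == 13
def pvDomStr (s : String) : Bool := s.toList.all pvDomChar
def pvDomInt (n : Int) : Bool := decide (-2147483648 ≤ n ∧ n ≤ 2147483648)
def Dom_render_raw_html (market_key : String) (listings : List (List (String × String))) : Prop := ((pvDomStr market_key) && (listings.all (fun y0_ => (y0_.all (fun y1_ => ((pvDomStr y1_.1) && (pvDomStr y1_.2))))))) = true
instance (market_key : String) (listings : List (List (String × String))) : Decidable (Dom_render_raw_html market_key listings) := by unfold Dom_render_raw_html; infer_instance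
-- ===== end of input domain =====

-- ===== PORT A =====
-- Header note: B replaces A's three copy-pasted per-market f-string templates with one
-- table-driven renderer (market config tuple + shared field list); objective: simpler.
-- dict lookup listing['k'] (first match on the association list); Pre_ guarantees the key is present,
-- so the .getD "" default is never taken on admitted inputs
def pvGet (l : List (String × String)) (k : String) : String := (l.lookup k).getD ""

def pvItemAmazon (l : List (String × String)) : String :=
  "  <div class=\"book-card\" data-listing-id=\"" ++ pvGet l "listing_id" ++ "\">\n    <span class=\"title\">" ++ pvGet l "title" ++ "</span>\n    <span class=\"author\">" ++ pvGet l "author" ++ "</span>\n    <span class=\"isbn\">" ++ pvGet l "isbn" ++ "</span>\n    <span class=\"edition\">" ++ pvGet l "edition" ++ "</span>\n    <span class=\"publisher\">" ++ pvGet l "publisher" ++ "</span>\n    <span class=\"format\">" ++ pvGet l "format" ++ "</span>\n    <span class=\"price\">" ++ pvGet l "price" ++ "</span>\n    <span class=\"shipping\">" ++ pvGet l "shipping" ++ "</span>\n    <span class=\"rating\">" ++ pvGet l "seller_rating" ++ "</span>\n    <span class=\"availability\">" ++ pvGet l "availability" ++ "</span>\n  </div>"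

def pvItemFlipkart (l : List (String × String)) : String :=
  "  <section class=\"listing\" data-listing-id=\"" ++ pvGet l "listing_id" ++ "\">\n    <div class=\"listing-title\">" ++ pvGet l "title" ++ "</div>\n    <div class=\"listing-author\">" ++ pvGet l "author" ++ "</div>\n    <div class=\"listing-isbn\">" ++ pvGet l "isbn" ++ "</div>\n    <div class=\"listing-edition\">" ++ pvGet l "edition" ++ "</div>\n    <div class=\"listing-publisher\">" ++ pvGet l "publisher" ++ "</div>\n    <div class=\"listing-format\">" ++ pvGet l "format" ++ "</div>\n    <div class=\"listing-price\">" ++ pvGet l "price" ++ "</div>\n    <div class=\"listing-shipping\">" ++ pvGet l "shipping" ++ "</div>\n    <div class=\"listing-rating\">" ++ pvGet l "seller_rating" ++ "</div>\n    <div class=\"listing-availability\">" ++ pvGet l "availability" ++ "</div>\n  </section>"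

def pvItemDefault (l : List (String × String)) : String :=
  "  <article class=\"book-row\" data-id=\"" ++ pvGet l "listing_id" ++ "\">\n    <p class=\"book-title\">" ++ pvGet l "title" ++ "</p>\n    <p class=\"book-author\">" ++ pvGet l "author" ++ "</p>\n    <p class=\"book-isbn\">" ++ pvGet l "isbn" ++ "</p>\n    <p class=\"book-edition\">" ++ pvGet l "edition" ++ "</p>\n    <p class=\"book-publisher\">" ++ pvGet l "publisher" ++ "</p>\n    <p class=\"book-format\">" ++ pvGet l "format" ++ "</p>\n    <p class=\"book-price\">" ++ pvGet l "price" ++ "</p>\n    <p class=\"book-shipping\">" ++ pvGet l "shipping" ++ "</p>\n    <p class=\"book-rating\">" ++ pvGet l "seller_rating" ++ "</p>\n    <p class=\"book-availability\">" ++ pvGet l "availability" ++ "</p>\n  </article>"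

def render_raw_html (market_key : String) (listings : List (List (String × String))) : String :=
  let items :=
    if market_key == "amazon_books" then
      PySem.Str.join "\n" (listings.map pvItemAmazon)
    else if market_key == "flipkart_books" then
      PySem.Str.join "\n" (listings.map pvItemFlipkart)
    else
      PySem.Str.join "\n" (listings.map pvItemDefault)
  "<!DOCTYPE html>\n<html lang=\"en\">\n<body>\n" ++ items ++ "\n</body>\n</html>\n"

-- ===== PORT B =====
-- the shared (class_suffix, dict_key) field table of Source B
def pvFields : List (String × String) :=
  [("title", "title"), ("author", "author"), ("isbn", "isbn"),
   ("edition", "edition"), ("publisher", "publisher"), ("format", "format"),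
   ("price", "price"), ("shipping", "shipping"), ("rating", "seller_rating"),
   ("availability", "availability")]

-- _MARKETS.get(market_key, _DEFAULT): (wrap_tag, wrap_cls, id_attr, field_tag, prefix)
def pvConfig (market_key : String) : String × String × String × String × String :=
  if market_key == "amazon_books" then ("div", "book-card", "data-listing-id", "span", "")
  else if market_key == "flipkart_books" then ("section", "listing", "data-listing-id", "div", "listing-")
  else ("article", "book-row", "data-id", "p", "book-")

def pvFieldLine (ftag pref : String) (l : List (String × String)) (f : String × String) : String :=
  "    <" ++ ftag ++ " class=\"" ++ pref ++ f.1 ++ "\">" ++ pvGet l f.2 ++ "</" ++ ftag ++ ">"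

def pvBlock (cfg : String × String × String × String × String) (l : List (String × String)) : String :=
  let lines :=
    ("  <" ++ cfg.1 ++ " class=\"" ++ cfg.2.1 ++ "\" " ++ cfg.2.2.1 ++ "=\"" ++ pvGet l "listing_id" ++ "\">")
      :: (pvFields.map (pvFieldLine cfg.2.2.2.1 cfg.2.2.2.2 l) ++ ["  </" ++ cfg.1 ++ ">"])
  PySem.Str.join "\n" lines

def render_raw_html_alt (market_key : String) (listings : List (List (String × String))) : String :=
  let cfg := pvConfig market_key
  let items := PySem.Str.join "\n" (listings.map (pvBlock cfg))
  "<!DOCTYPE html>\n<html lang=\"en\">\n<body>\n" ++ items ++ "\n</body>\n</html>\n"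

-- ===== PRECONDITION & SPEC =====
-- the dict keys every template reads
def pvKeys : List String :=
  ["listing_id", "title", "author", "isbn", "edition", "publisher", "format",
   "price", "shipping", "seller_rating", "availability"]

-- Pre_ excludes exactly the listings missing one of the 11 keys: Python A raises KeyError there.
def Pre_render_raw_html (market_key : String) (listings : List (List (String × String))) : Prop :=
  ∀ l ∈ listings, ∀ k ∈ pvKeys, (l.lookup k).isSome = true

instance (market_key : String) (listings : List (List (String × String))) : Decidable (Pre_render_raw_html market_key listings) := by unfold Pre_render_raw_html; infer_instance

def pvWitness_render_raw_html : String × (List (List (String × String))) :=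
  ("amazon_books",
   [[("listing_id", "1"), ("title", "T"), ("author", "A"), ("isbn", "I"),
     ("edition", "E"), ("publisher", "P"), ("format", "F"), ("price", "9"),
     ("shipping", "S"), ("seller_rating", "R"), ("availability", "Y")]])

def Spec_render_raw_html (market_key : String) (listings : List (List (String × String))) (out : String) : Prop := out = render_raw_html_alt market_key listings
instance (market_key : String) (listings : List (List (String × String))) (out : String) : Decidable (Spec_render_raw_html market_key listings out) := by unfold Spec_render_raw_html; infer_instance

-- ===== CLAIM (what is proved, stated in full; the proofs are below) =====
def Claim_equal_render_raw_html : Prop := ∀ (market_key : String) (listings : List (List (String × String))), Dom_render_raw_html market_key listings → Pre_render_raw_html market_key listings → Spec_render_raw_html market_key listings (render_raw_html market_key listings)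

-- ===== LEMMAS AND PROOFS =====
set_option maxRecDepth 8192 in
lemma pvItemAmazon_eq (l : List (String × String)) :
    pvItemAmazon l = pvBlock ("div", "book-card", "data-listing-id", "span", "") l := by
  apply String.toList_injective
  simp [pvItemAmazon, pvBlock, pvFields, pvFieldLine, PySem.Str.join, PySem.Chars.join,
        List.intercalate, List.intersperse]

set_option maxRecDepth 8192 in
lemma pvItemFlipkart_eq (l : List (String × String)) :
    pvItemFlipkart l = pvBlock ("section", "listing", "data-listing-id", "div", "listing-") l := by
  apply String.toList_injective
  simp [pvItemFlipkart, pvBlock, pvFields, pvFieldLine, PySem.Str.join, PySem.Chars.join,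
        List.intercalate, List.intersperse]

set_option maxRecDepth 8192 in
lemma pvItemDefault_eq (l : List (String × String)) :
    pvItemDefault l = pvBlock ("article", "book-row", "data-id", "p", "book-") l := by
  apply String.toList_injective
  simp [pvItemDefault, pvBlock, pvFields, pvFieldLine, PySem.Str.join, PySem.Chars.join,
        List.intercalate, List.intersperse]

-- ===== VERDICT (by name: the statement is the Claim_ definition above) =====
theorem render_raw_html_spec : Claim_equal_render_raw_html := by
  intro market_key listings _ _
  unfold Spec_render_raw_html render_raw_html render_raw_html_alt pvConfig
  by_cases h1 : market_key == "amazon_books"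
  · simp only [h1, if_pos]
    rw [List.map_congr_left (fun l _ => pvItemAmazon_eq l)]
  · by_cases h2 : market_key == "flipkart_books"
    · simp only [h1, h2, if_false, if_true, Bool.false_eq_true]
      rw [List.map_congr_left (fun l _ => pvItemFlipkart_eq l)]
    · simp only [h1, h2, if_false, Bool.false_eq_true]
      rw [List.map_congr_left (fun l _ => pvItemDefault_eq l)]
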